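-- pv_equiv track=rewrite | github.com/juasanarr/MSList-to-Excel | procesado.py | correccion
-- ===== SOURCE A (Python) =====
-- def correccion(s):
--     res = ''
--     mayus = False
--     for c in s:
--         if c == ",":
--             mayus = True
--         elif c == '"':
--             mayus = False
--         elif c != " " and mayus:
--             c = str(c).lower()
--             mayus = False
--         res += c
--     return res
-- ===== SOURCE B (Python) =====
-- def correccion(s):
--     def fix(p):
--         stripped = p.lstrip(' ')
--         if stripped:
--             n = len(p) - len(stripped)
--             return p[:n] + stripped[0].lower() + stripped[1:]
--         return p
--     parts = s.split(',')
--     return ','.join([parts[0]] + [fix(p) for p in parts[1:]])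
-- ===== Notes on version B (the rewrite author's own statement) =====
-- stated objective: alternative
-- what changed: Replaces A's character-by-character boolean-flag state machine with split-on-comma, lowercasing the first non-space character of every piece after a comma (lowering a quote or comma is the identity, so the flag logic disappears), then joining with commas.
import Mathlib
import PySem

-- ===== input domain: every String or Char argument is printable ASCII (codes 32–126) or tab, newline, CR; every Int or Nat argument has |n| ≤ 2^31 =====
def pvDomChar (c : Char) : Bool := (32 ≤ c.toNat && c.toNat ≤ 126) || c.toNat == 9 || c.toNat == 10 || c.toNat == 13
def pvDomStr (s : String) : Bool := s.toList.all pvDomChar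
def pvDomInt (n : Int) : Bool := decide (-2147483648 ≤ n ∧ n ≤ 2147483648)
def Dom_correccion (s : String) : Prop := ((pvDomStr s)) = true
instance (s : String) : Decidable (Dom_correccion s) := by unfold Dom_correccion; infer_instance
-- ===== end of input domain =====

-- B replaces A's character-by-character flag state machine by split-on-comma /
-- lowercase-the-first-non-space-char-of-each-later-piece / join (alternative decomposition, same cost).

-- ===== PORT A =====
-- literal transliteration of A: fold over the characters carrying (res, mayus)
def correccion (s : String) : String :=
  String.mk
    (s.toList.foldl
      (fun (acc : List Char × Bool) c =>
        if c = ',' then (acc.1 ++ [c], true)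
        else if c = '"' then (acc.1 ++ [c], false)
        else if c ≠ ' ' ∧ acc.2 = true then (acc.1 ++ [PySem.Chars.lowerChar c], false)
        else (acc.1 ++ [c], acc.2))
      ([], false)).1

-- ===== PORT B =====
-- port of Source B's fix: lstrip(' ') = dropWhile, then p[:n] + first-char-lowered + rest
def pvFixB (p : List Char) : List Char :=
  let stripped := p.dropWhile (· = ' ')
  match stripped with
  | [] => p
  | c :: t => p.take (p.length - stripped.length) ++ PySem.Chars.lowerChar c :: t

-- hand port of s.split(','): exact for Python's str.split with a one-char separator
def pySplitComma : List Char → List (List Char)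
  | [] => [[]]
  | c :: t =>
    if c = ',' then [] :: pySplitComma t
    else
      match pySplitComma t with
      | [] => [[c]]
      | p :: ps => (c :: p) :: ps

def correccion_alt (s : String) : String :=
  match pySplitComma s.toList with
  | [] => ""  -- unreachable: split never returns []
  | p :: ps => String.mk (List.intercalate [','] (p :: ps.map pvFixB))

-- ===== PRECONDITION & SPEC =====
def Spec_correccion (s : String) (out : String) : Prop := out = correccion_alt s
instance (s : String) (out : String) : Decidable (Spec_correccion s out) := by unfold Spec_correccion; infer_instance

-- ===== CLAIM (what is proved, stated in full; the proofs are below) =====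
def Claim_equal_correccion : Prop := ∀ (s : String), Dom_correccion s → Spec_correccion s (correccion s)

-- ===== LEMMAS AND PROOFS =====

-- recursive form of Source B's fix (proof helper)
def pvFix : List Char → List Char
  | [] => []
  | c :: t => if c = ' ' then ' ' :: pvFix t else PySem.Chars.lowerChar c :: t

-- A's loop as a structural recursion (proof helper)
def pvAux : List Char → Bool → List Char
  | [], _ => []
  | c :: t, m =>
    if c = ',' then c :: pvAux t true
    else if c = '"' then c :: pvAux t false
    else if c ≠ ' ' ∧ m = true then PySem.Chars.lowerChar c :: pvAux t false
    else c :: pvAux t m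

-- B's glue, parameterised by what happens to the first piece
def pvGlue (f : List Char → List Char) : List (List Char) → List Char
  | [] => []
  | p :: ps => List.intercalate [','] (f p :: ps.map pvFix)

theorem pvFoldl_fst (l : List Char) : ∀ (acc : List Char) (m : Bool),
    (l.foldl
      (fun (acc : List Char × Bool) c =>
        if c = ',' then (acc.1 ++ [c], true)
        else if c = '"' then (acc.1 ++ [c], false)
        else if c ≠ ' ' ∧ acc.2 = true then (acc.1 ++ [PySem.Chars.lowerChar c], false)
        else (acc.1 ++ [c], acc.2))
      (acc, m)).1 = acc ++ pvAux l m := by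
  induction l with
  | nil => intro acc m; simp [pvAux]
  | cons c t ih =>
    intro acc m
    by_cases h1 : c = ','
    · simp [h1, pvAux, ih]
    · by_cases h2 : c = '"'
      · simp [h2, pvAux, ih]
      · by_cases h3 : c ≠ ' ' ∧ m = true
        · simp [h1, h2, h3, pvAux, ih]
        · simp [h1, h2, h3, pvAux, ih]

theorem pvSplit_ne_nil (l : List Char) : pySplitComma l ≠ [] := by
  cases l with
  | nil => simp [pySplitComma]
  | cons c t =>
    simp only [pySplitComma]
    split
    · simp
    · cases h : pySplitComma t <;> simp

theorem pvIntercalate_cons (p : List Char) (qs : List (List Char)) (hqs : qs ≠ []) :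
    List.intercalate [','] (p :: qs) = p ++ ',' :: List.intercalate [','] qs := by
  cases qs with
  | nil => exact absurd rfl hqs
  | cons q qs => simp [List.intercalate, List.intersperse]

theorem pvIntercalate_cons_head (x : Char) (y : List Char) (qs : List (List Char)) :
    List.intercalate [','] ((x :: y) :: qs) = x :: List.intercalate [','] (y :: qs) := by
  cases qs with
  | nil => simp [List.intercalate]
  | cons q qs =>
    rw [pvIntercalate_cons (x :: y) _ (by simp), pvIntercalate_cons y _ (by simp)]
    simp

theorem pvFix_all_spaces (p : List Char) (h : ∀ x ∈ p, x = ' ') : pvFix p = p := by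
  induction p with
  | nil => rfl
  | cons c t ih =>
    have hc := h c (by simp)
    simp [pvFix, hc, ih (fun x hx => h x (by simp [hx]))]

theorem pvFixB_eq (p : List Char) : pvFixB p = pvFix p := by
  induction p with
  | nil => rfl
  | cons c t ih =>
    by_cases hc : c = ' '
    · subst hc
      cases h : t.dropWhile (· = ' ') with
      | nil =>
        have hall : ∀ x ∈ t, x = ' ' := by
          simpa [List.dropWhile_eq_nil_iff] using h
        simp [pvFixB, pvFix, h, pvFix_all_spaces t hall]
      | cons d r =>
        have hle : (d :: r).length ≤ t.length := by
          have := List.length_dropWhile_le (fun x => decide (x = ' ')) t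
          rw [h] at this; exact this
        have hB1 : pvFixB (' ' :: t)
            = List.take (t.length + 1 - (d :: r).length) (' ' :: t)
              ++ PySem.Chars.lowerChar d :: r := by
          simp [pvFixB, h]
        have hB2 : pvFixB t
            = List.take (t.length - (d :: r).length) t
              ++ PySem.Chars.lowerChar d :: r := by
          simp [pvFixB, h]
        rw [hB1,
            show t.length + 1 - (d :: r).length = (t.length - (d :: r).length) + 1 by
              simp at hle ⊢; omega,
            List.take_succ_cons,
            show pvFix (' ' :: t) = ' ' :: pvFix t from by simp [pvFix],
            ← ih, hB2]
        simp
    · simp [pvFixB, pvFix, hc]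

theorem pvLower_quote : PySem.Chars.lowerChar '"' = '"' := by decide

theorem pvMain (l : List Char) :
    pvAux l false = pvGlue id (pySplitComma l) ∧ pvAux l true = pvGlue pvFix (pySplitComma l) := by
  induction l with
  | nil => simp [pvAux, pySplitComma, pvGlue, pvFix, List.intercalate]
  | cons c t ih =>
    obtain ⟨ih1, ih2⟩ := ih
    obtain ⟨p, ps, hsplit⟩ : ∃ p ps, pySplitComma t = p :: ps := by
      cases h : pySplitComma t with
      | nil => exact absurd h (pvSplit_ne_nil t)
      | cons p ps => exact ⟨p, ps, rfl⟩
    rw [hsplit] at ih1 ih2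
    by_cases h1 : c = ','
    · -- split gives [] :: p :: ps; both sides prepend ','
      subst h1
      have hI : List.intercalate [','] (([] : List Char) :: pvFix p :: ps.map pvFix)
          = ',' :: List.intercalate [','] (pvFix p :: ps.map pvFix) := by
        rw [pvIntercalate_cons ([] : List Char) _ (by simp)]; simp
      constructor <;>
      · simp [pvAux, pySplitComma, hsplit, pvGlue, ih2, pvFix, hI]
    · have hsplit' : pySplitComma (c :: t) = (c :: p) :: ps := by
        simp only [pySplitComma, if_neg h1, hsplit]
      rw [hsplit']
      constructor
      · -- state false: c passes through unchanged, state stays false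
        have hstep : pvAux (c :: t) false = c :: pvAux t false := by
          by_cases h2 : c = '"' <;> simp [pvAux, h1, h2]
        rw [hstep, ih1]
        simp only [pvGlue, id, pvIntercalate_cons_head]
      · -- state true
        by_cases h2 : c = '"'
        · subst h2
          have hstep : pvAux ('"' :: t) true = '"' :: pvAux t false := by simp [pvAux]
          rw [hstep, ih1]
          have hfix : pvFix ('"' :: p) = '"' :: p := by simp [pvFix, pvLower_quote]
          simp only [pvGlue, id, hfix, pvIntercalate_cons_head]
        · by_cases h3 : c = ' '
          · subst h3
            have hstep : pvAux (' ' :: t) true = ' ' :: pvAux t true := by simp [pvAux]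
            rw [hstep, ih2]
            have hfix : pvFix (' ' :: p) = ' ' :: pvFix p := by simp [pvFix]
            simp only [pvGlue, hfix, pvIntercalate_cons_head]
          · have hstep : pvAux (c :: t) true = PySem.Chars.lowerChar c :: pvAux t false := by
              simp [pvAux, h1, h2, h3]
            rw [hstep, ih1]
            have hfix : pvFix (c :: p) = PySem.Chars.lowerChar c :: p := by simp [pvFix, h3]
            simp only [pvGlue, id, hfix, pvIntercalate_cons_head]

-- ===== VERDICT (by name: the statement is the Claim_ definition above) =====
theorem correccion_spec : Claim_equal_correccion := by
  intro s _
  unfold Spec_correccion correccion correccion_alt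
  rw [pvFoldl_fst, (pvMain s.toList).1]
  obtain ⟨p, ps, h⟩ : ∃ p ps, pySplitComma s.toList = p :: ps := by
    cases h : pySplitComma s.toList with
    | nil => exact absurd h (pvSplit_ne_nil s.toList)
    | cons p ps => exact ⟨p, ps, rfl⟩
  rw [h]
  have hFB : pvFixB = pvFix := funext pvFixB_eq
  simp [pvGlue, hFB]
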